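-- pv_equiv track=rewrite | github.com/Mejri10/codewars-solutions | 7-kyu/max-min-arrays/python/solution.py | solve
-- ===== SOURCE A (Python) =====
-- def solve(arr):
--     arrSorted = sorted(arr, reverse=True)
--     answer = []
--     n = len(arrSorted)
--     for i in range(n//2):
--         answer.append(arrSorted[i])
--         answer.append(arrSorted[n - i - 1])
--     return answer if n % 2 == 0 else answer + [arrSorted[n//2]]
-- ===== SOURCE B (Python) =====
-- def solve(arr):
--     d = sorted(arr)
--     out = []
--     while d:
--         out.append(d.pop())
--         if d:
--             out.append(d.pop(0))
--     return out
-- ===== Notes on version B (the rewrite author's own statement) =====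
-- stated objective: simpler
-- what changed: B sorts ascending and consumes the list from both ends in a single while-loop (pop max, then pop min), so the odd-middle branch and all index arithmetic of A disappear; the lone middle element falls out as the final pop.
import Mathlib
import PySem

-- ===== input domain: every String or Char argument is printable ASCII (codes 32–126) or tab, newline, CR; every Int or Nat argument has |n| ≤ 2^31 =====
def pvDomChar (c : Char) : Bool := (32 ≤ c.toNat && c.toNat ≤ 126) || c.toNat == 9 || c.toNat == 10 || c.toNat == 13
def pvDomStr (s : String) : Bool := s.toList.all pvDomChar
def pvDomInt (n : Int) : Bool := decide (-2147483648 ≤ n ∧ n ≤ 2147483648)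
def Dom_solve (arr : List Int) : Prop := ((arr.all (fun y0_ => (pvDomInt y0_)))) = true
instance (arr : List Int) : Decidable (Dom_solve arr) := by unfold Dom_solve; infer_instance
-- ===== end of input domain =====

-- B sorts ascending and consumes the list from both ends in one while-loop (pop max, then pop min),
-- removing A's odd-length branch and index arithmetic; same return value, objective: simpler.


-- ===== PORT A =====
def solve (arr : List Int) : List Int :=
  let arrSorted := PySem.List.sorted arr (fun x => x) true
  let n : Nat := arrSorted.length
  let answer :=
    (PySem.List.pyRange 0 ((n / 2 : Nat) : Int) 1).foldl
      (fun acc i =>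
        (acc ++ [PySem.List.pyGetD arrSorted i 0]) ++
          [PySem.List.pyGetD arrSorted ((n : Int) - i - 1) 0]) []
  if n % 2 == 0 then answer
  else answer ++ [PySem.List.pyGetD arrSorted ((n / 2 : Nat) : Int) 0]

-- ===== PORT B =====
-- the while-loop of Source B: pop from the right, then (if still non-empty) pop from the left
def solveAltLoop (d : List Int) : List Int :=
  if h : d = [] then []
  else
    let x := d.getLast h
    let d1 := d.dropLast
    if h1 : d1 = [] then [x]
    else x :: d1.head h1 :: solveAltLoop d1.tail
termination_by d.length
decreasing_by
  have hd : d.length ≠ 0 := fun hc => h (List.eq_nil_of_length_eq_zero hc)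
  have hd1 : d.dropLast.length = d.length - 1 := List.length_dropLast
  have hd1' : d.dropLast.length ≠ 0 := fun hc => h1 (List.eq_nil_of_length_eq_zero hc)
  simp only [List.length_tail, hd1]
  omega

def solve_alt (arr : List Int) : List Int :=
  solveAltLoop (PySem.List.sorted arr (fun x => x) false)

-- ===== PRECONDITION & SPEC =====
def Spec_solve (arr : List Int) (out : List Int) : Prop := out = solve_alt arr
instance (arr : List Int) (out : List Int) : Decidable (Spec_solve arr out) := by unfold Spec_solve; infer_instance

-- ===== CLAIM (what is proved, stated in full; the proofs are below) =====
def Claim_equal_solve : Prop := ∀ (arr : List Int), Dom_solve arr → Spec_solve arr (solve arr)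

-- ===== LEMMAS AND PROOFS =====

-- shared characterisation: interleave a descending list from its two ends
def interleaveEnds : List Int → List Int
  | [] => []
  | a :: rest =>
    if h : rest = [] then [a]
    else a :: rest.getLast h :: interleaveEnds rest.dropLast
termination_by l => l.length
decreasing_by
  have h2 : rest.length ≠ 0 := fun hc => h (List.eq_nil_of_length_eq_zero hc)
  have h3 : rest.dropLast.length = rest.length - 1 := List.length_dropLast
  simp only [List.length_cons, h3]
  omega

lemma interleaveEnds_two (a b : Int) (mid : List Int) :
    interleaveEnds (a :: (mid ++ [b])) = a :: b :: interleaveEnds mid := by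
  rw [interleaveEnds]
  have h : mid ++ [b] ≠ [] := by simp
  simp [h, List.getLast_append, List.dropLast_concat]

-- B side: the while-loop on the ascending list computes interleaveEnds of the descending one
lemma solveAltLoop_reverse_aux : ∀ (n : Nat) (s : List Int), s.length ≤ n →
    solveAltLoop s.reverse = interleaveEnds s := by
  intro n
  induction n with
  | zero =>
    intro s hs
    have : s = [] := List.eq_nil_of_length_eq_zero (Nat.le_zero.mp hs)
    subst this; simp [solveAltLoop, interleaveEnds]
  | succ n ih =>
    intro s hs
    match s with
    | [] => simp [solveAltLoop, interleaveEnds]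
    | a :: rest =>
      rw [interleaveEnds, solveAltLoop]
      simp only [List.reverse_cons]
      have hne : rest.reverse ++ [a] ≠ [] := by simp
      rw [dif_neg hne]
      have hgl : (rest.reverse ++ [a]).getLast hne = a := by
        simp [List.getLast_append]
      have hdl : (rest.reverse ++ [a]).dropLast = rest.reverse := List.dropLast_concat
      simp only [hgl, hdl]
      by_cases h : rest = []
      · subst h; simp
      · have hrne : rest.reverse ≠ [] := by simpa using h
        simp only [h, hrne, dite_false]
        have hhead : rest.reverse.head hrne = rest.getLast h := by
          rw [List.head_reverse]
        have htail : rest.reverse.tail = rest.dropLast.reverse := by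
          rw [List.tail_reverse]
        have hlen : rest.dropLast.length ≤ n := by
          have h3 : rest.dropLast.length = rest.length - 1 := List.length_dropLast
          simp only [List.length_cons] at hs
          omega
        rw [hhead, htail, ih rest.dropLast hlen]

lemma solveAltLoop_reverse (s : List Int) :
    solveAltLoop s.reverse = interleaveEnds s :=
  solveAltLoop_reverse_aux s.length s (le_refl _)

-- A side, step 1: the fold over the Python range as a flatMap over Nat indices
lemma solve_fold_eq_flatMap (s : List Int) (k : Nat) (hk : 2 * k ≤ s.length + 1) :
    (PySem.List.pyRange 0 ((k : Nat) : Int) 1).foldl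
      (fun acc i =>
        (acc ++ [PySem.List.pyGetD s i 0]) ++
          [PySem.List.pyGetD s ((s.length : Int) - i - 1) 0]) []
    = (List.range k).flatMap (fun j => [s.getD j 0, s.getD (s.length - 1 - j) 0]) := by
  have hfold := PySem.List.foldl_append_eq_flatMap
    (l := PySem.List.pyRange 0 ((k : Nat) : Int) 1)
    (g := fun i => [PySem.List.pyGetD s i 0, PySem.List.pyGetD s ((s.length : Int) - i - 1) 0])
    (acc := ([] : List Int))
  simp only [List.append_assoc, List.singleton_append] at hfold ⊢
  rw [hfold, List.nil_append]
  rw [PySem.List.pyRange_one]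
  simp only [Int.sub_zero, Int.toNat_natCast, List.flatMap_map]
  apply List.flatMap_congr
  intro j hj
  have hj' : j < k := List.mem_range.mp hj
  have hjlen : j < s.length := by omega
  have h1 : PySem.List.pyGetD s ((0 : Int) + (j : Nat)) 0 = s.getD j 0 := by
    simp
  have h2 : PySem.List.pyGetD s ((s.length : Int) - ((0 : Int) + (j : Nat)) - 1) 0
      = s.getD (s.length - 1 - j) 0 := by
    have hcast : ((s.length : Int) - ((0 : Int) + (j : Nat)) - 1)
        = ((s.length - 1 - j : Nat) : Int) := by push_cast; omega
    rw [hcast]; simp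
  rw [h1, h2]

-- A side, step 2: the flatMap form equals interleaveEnds (two-ended induction via fuel)
lemma flatMap_core_aux : ∀ (n : Nat) (s : List Int), s.length ≤ n →
    (List.range (s.length / 2)).flatMap
        (fun j => [s.getD j 0, s.getD (s.length - 1 - j) 0])
      ++ (if s.length % 2 == 0 then [] else [s.getD (s.length / 2) 0])
    = interleaveEnds s := by
  intro n
  induction n with
  | zero =>
    intro s hs
    have : s = [] := List.eq_nil_of_length_eq_zero (Nat.le_zero.mp hs)
    subst this; simp [interleaveEnds]
  | succ n ih =>
    intro s hs
    match s with
    | [] => simp [interleaveEnds]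
    | a :: rest =>
      by_cases hrne : rest = []
      case pos => subst hrne; simp [interleaveEnds]
      case neg =>
      -- decompose rest = mid ++ [b]
      obtain ⟨mid, b, hmb⟩ : ∃ mid b, rest = mid ++ [b] := by
        refine ⟨rest.dropLast, rest.getLast hrne, ?_⟩
        exact (List.dropLast_concat_getLast hrne).symm
      subst hmb
      set m := mid.length with hm
      have hlen : (a :: (mid ++ [b])).length = m + 2 := by simp [hm]
      rw [interleaveEnds_two]
      rw [hlen]
      have hdiv : (m + 2) / 2 = m / 2 + 1 := by omega
      rw [hdiv, List.range_succ_eq_map, List.flatMap_cons, List.flatMap_map]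
      -- head pair
      have hget0 : (a :: (mid ++ [b])).getD 0 0 = a := rfl
      have hgetlast : (a :: (mid ++ [b])).getD (m + 2 - 1 - 0) 0 = b := by
        simp only [Nat.sub_zero]
        have : m + 2 - 1 = m + 1 := by omega
        rw [this]
        simp [List.getD, List.getElem?_append_right, hm]
      rw [hget0, hgetlast]
      -- body: shift indices into mid
      have hbody : ∀ j ∈ List.range (m / 2),
          (fun j => [(a :: (mid ++ [b])).getD j 0,
                     (a :: (mid ++ [b])).getD (m + 2 - 1 - j) 0]) (j + 1)
          = [mid.getD j 0, mid.getD (m - 1 - j) 0] := by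
        intro j hj
        have hj' : j < m / 2 := List.mem_range.mp hj
        have hjm : j < m := by omega
        simp only
        congr 1
        · simp only [List.getD, List.getElem?_cons_succ]
          rw [List.getElem?_append_left hjm]
        · have h1 : m + 2 - 1 - (j + 1) = (m - 1 - j) + 1 := by omega
          rw [h1]
          simp only [List.getD, List.getElem?_cons_succ]
          have h2 : m - 1 - j < m := by omega
          rw [List.getElem?_append_left h2]
      rw [List.flatMap_congr hbody]
      -- middle element
      have hmod : ((m + 2) % 2 == 0) = (m % 2 == 0) := by
        congr 1; omega
      rw [hmod]
      have hmid : (if (m % 2 == 0) = true then ([] : List Int)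
          else [(a :: (mid ++ [b])).getD (m / 2 + 1) 0])
          = (if (m % 2 == 0) = true then ([] : List Int) else [mid.getD (m / 2) 0]) := by
        by_cases hpar : (m % 2 == 0) = true
        · simp [hpar]
        · have hmo : m % 2 = 1 := by
            rcases Nat.mod_two_eq_zero_or_one m with h | h
            · exact absurd (by simpa using h) hpar
            · exact h
          have hlt : m / 2 < m := by omega
          simp only [hpar, if_false]
          simp only [List.getD, List.getElem?_cons_succ]
          rw [List.getElem?_append_left hlt]
      rw [hmid]
      have hrec := ih mid (by simp only [List.length_cons, List.length_append,
        List.length_singleton] at hs; omega)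
      rw [← hm] at hrec
      simp only [List.append_assoc]
      rw [hrec]
      simp

theorem solve_eq_interleave (arr : List Int) :
    solve arr = interleaveEnds (PySem.List.sorted arr (fun x => x) true) := by
  unfold solve
  set s := PySem.List.sorted arr (fun x => x) true with hsdef
  simp only
  rw [solve_fold_eq_flatMap s (s.length / 2) (by omega)]
  rw [← flatMap_core_aux s.length s (le_refl _)]
  by_cases hpar : (s.length % 2 == 0) = true
  · simp [hpar]
  · simp only [hpar, if_false, Bool.false_eq_true]
    congr 1
    have hc : ∀ (i : Int), i = ((s.length / 2 : Nat) : Int) →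
        PySem.List.pyGetD s i 0 = s[s.length / 2]?.getD 0 := by
      intro i hi
      subst hi
      rw [PySem.List.pyGetD_natCast]
      rfl
    rw [hc _ (by omega)]
    rfl

theorem sorted_asc_eq_reverse_desc (arr : List Int) :
    PySem.List.sorted arr (fun x => x) false
      = (PySem.List.sorted arr (fun x => x) true).reverse := by
  apply PySem.List.sorted_id_eq_of_perm_of_pairwise
  · exact (List.reverse_perm _).trans (PySem.List.sorted_perm arr (fun x => x) true)
  · have hp := PySem.List.sorted_pairwise_rev (xs := arr) (key := fun x => x)
    exact (List.pairwise_reverse).mpr hp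

-- ===== VERDICT (by name: the statement is the Claim_ definition above) =====
theorem solve_spec : Claim_equal_solve := by
  intro arr _
  unfold Spec_solve solve_alt
  rw [sorted_asc_eq_reverse_desc, solveAltLoop_reverse, solve_eq_interleave]
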